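-- pv_equiv track=rewrite | github.com/ebylaska/ML_Potentials | Tutorial/tutorial5.py | xydata_plotdatajs
-- ===== SOURCE A (Python) =====
-- def evalnum(s):
--    try:
--       return int(s)
--    except ValueError:
--       return float(s)
--
-- def isevalnum(s):
--    try:
--       x = evalnum(s)
--       return True
--    except:
--       return False
--
-- def xydata_plotdatajs(edat,label):
--
--    title = label
--    xylabels = ''
--    if ('#Title' in edat):
--       title = edat.split("#Title")[1].split('\n')[0]
--    else:
--       title = label
--    if ('#Labels' in edat): xylabels = edat.split("#Labels")[1].split('\n')[0]
--
--    elist = edat.strip().split("\n")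
--    while ("#" in elist[0]):
--       elist = elist[1:]
--
--    ny = len(elist[0].split())-1
--    hasheader = not isevalnum(elist[0].split()[0])
--
--    if (hasheader):
--       xlabel = elist[0].split()[0]
--       xdat = "['%s'," % (elist[0].split()[0])
--       ydat = []
--       for i in range(ny):
--          ydat.append("['%s'," % (elist[0].split()[i+1]))
--       elist = elist[1:]
--    else:
--       xlabel = 'x'
--       xdat = "['x',"
--       ydat = []
--       for i in range(ny):
--          ydat.append("['y%d'," % i)
--       if (xylabels!=''):
--          xylist = xylabels.split()
--          xlabel = xylist[0]
--          xdat = "['%s'," % (xylist[0])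
--          for i in range(1,len(xylist)):
--             ydat[i-1] = "['%s'," % (xylist[i])
--
--
--    for ee in elist:
--       ss = ee.split()
--       if ("#" not in ss[0]):
--          xdat += ss[0] + ", "
--          for i in range(ny):
--             ydat[i] += ss[i+1] + ", "
--    xdat  = xdat.rstrip(',') + "]"
--    for i in range(ny):
--       ydat[i] = ydat[i].rstrip(',') + "]"
--
--    msg4 = "<html>\n"
--    msg4 += '''
--     <link href="https://cdnjs.cloudflare.com/ajax/libs/c3/0.6.9/c3.min.css" rel="stylesheet">
--     <script type="text/javascript" src="https://d3js.org/d3.v5.min.js" charset="utf-8"></script>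
--     <script type="text/javascript" src="https://cdnjs.cloudflare.com/ajax/libs/c3/0.6.9/c3.min.js"></script>
--     <br> <center><b> %s </b></center>
--     <div id="chart"></div>
--     <script type="text/javascript">
--     var chart = c3.generate({
--        bindto: '#chart',
--        size: { height: 480},
--        data: {
--          type: 'spline',
--          x: '%s',
--          columns: [
--            %s  ''' % (title,xlabel,xdat)
--    for i in range(ny): msg4 += ", %s" % (ydat[i])
--    msg4 += '''
--          ]
--        },
--        axis: {
--            x: {
--                label: '%s',
--                tick: {count: 10, format: d3.format(".2f"), culling: false}
--            },
--            y: {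
--                label: 'y data'
--            }
--        }
--     });
--     </script>
--     ''' % (xlabel)
--
--    msg4 += "</html>\n"
--
--    return msg4
-- ===== SOURCE B (Python) =====
-- # B: parse the data block into a row table once, then emit each chart column
-- # with a single join, instead of A's per-line accumulation into mutable strings.
--
-- def evalnum(s):
--    try:
--       return int(s)
--    except ValueError:
--       return float(s)
--
-- def isevalnum(s):
--    try:
--       x = evalnum(s)
--       return True
--    except:
--       return False
--
-- def _column(name, vals):
--    if vals:
--       return "['%s'," % name + ", ".join(vals) + ", ]"
--    return "['%s']" % name
--
-- _HEAD = '''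
--     <link href="https://cdnjs.cloudflare.com/ajax/libs/c3/0.6.9/c3.min.css" rel="stylesheet">
--     <script type="text/javascript" src="https://d3js.org/d3.v5.min.js" charset="utf-8"></script>
--     <script type="text/javascript" src="https://cdnjs.cloudflare.com/ajax/libs/c3/0.6.9/c3.min.js"></script>
--     <br> <center><b> %s </b></center>
--     <div id="chart"></div>
--     <script type="text/javascript">
--     var chart = c3.generate({
--        bindto: '#chart',
--        size: { height: 480},
--        data: {
--          type: 'spline',
--          x: '%s',
--          columns: [
--            %s  '''
--
-- _TAIL = '''
--          ]
--        },
--        axis: {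
--            x: {
--                label: '%s',
--                tick: {count: 10, format: d3.format(".2f"), culling: false}
--            },
--            y: {
--                label: 'y data'
--            }
--        }
--     });
--     </script>
--     '''
--
-- def xydata_plotdatajs(edat, label):
--    title = edat.split("#Title")[1].split('\n')[0] if '#Title' in edat else label
--    xylabels = edat.split("#Labels")[1].split('\n')[0] if '#Labels' in edat else ''
--
--    lines = edat.strip().split("\n")
--    k = 0
--    while '#' in lines[k]:
--       k += 1
--    lines = lines[k:]
--
--    first = lines[0].split()
--    ny = len(first) - 1
--    if not isevalnum(first[0]):
--       names, body = first, lines[1:]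
--    else:
--       names = ['x'] + ['y%d' % i for i in range(ny)]
--       if xylabels != '':
--          xl = xylabels.split()
--          names = xl + names[len(xl):]
--       body = lines
--
--    rows = [ln.split() for ln in body]
--    data = [r for r in rows if '#' not in r[0]]
--    cols = [_column(names[i], [r[i] for r in data]) for i in range(ny + 1)]
--
--    return ("<html>\n" + _HEAD % (title, names[0], cols[0])
--            + ''.join(", %s" % c for c in cols[1:])
--            + _TAIL % names[0] + "</html>\n")
-- ===== Notes on version B (the rewrite author's own statement) =====
-- stated objective: simpler
-- what changed: B parses the data block once into a row table and emits each chart column with a single join (reproducing A's trailing ', ]' byte-for-byte), instead of A's per-line loop that appends into the x-string and every mutable y-string and then rstrips them.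
-- outside the precondition, e.g. on xydata_plotdatajs('#only', 'L'): A raises IndexError, B raises IndexError; on xydata_plotdatajs('1 2\n3', 'L'): A raises IndexError, B raises IndexError
import Mathlib
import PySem

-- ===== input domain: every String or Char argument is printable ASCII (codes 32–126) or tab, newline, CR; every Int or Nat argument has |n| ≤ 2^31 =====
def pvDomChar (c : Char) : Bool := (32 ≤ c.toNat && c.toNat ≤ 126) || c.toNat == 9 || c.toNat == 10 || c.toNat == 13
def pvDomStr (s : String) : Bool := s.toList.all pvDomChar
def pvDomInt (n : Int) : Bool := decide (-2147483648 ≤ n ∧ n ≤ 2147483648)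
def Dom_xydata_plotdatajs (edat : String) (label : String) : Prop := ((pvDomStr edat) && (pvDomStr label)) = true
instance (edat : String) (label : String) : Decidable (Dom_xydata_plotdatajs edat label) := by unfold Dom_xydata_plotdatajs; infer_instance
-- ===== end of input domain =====

-- B rebuilds the chart page from a parsed row table with one join per column
-- instead of A's per-line string accumulation; objective: simpler (same cost).

-- ===== PORT A =====
-- Shared helpers first: the module's isevalnum (int(s)-or-float(s) success test,
-- ported by hand, exact on the ASCII domain — PySem has no float parser), the
-- '#Title'/'#Labels' preamble and the template literals; both Python versions
-- contain these lines verbatim.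

-- digits with single underscores between digits (Python numeric-literal rule)
def pvDigitsUT : List Char → Bool
  | [] => true
  | '_' :: rest =>
    match rest with
    | [] => false
    | d :: r => d.isDigit && pvDigitsUT r
  | c :: rest => c.isDigit && pvDigitsUT rest

def pvDigitsU : List Char → Bool
  | [] => false
  | c :: rest => c.isDigit && pvDigitsUT rest

-- optional single leading sign
def pvSign : List Char → List Char
  | [] => []
  | c :: r => if c == '+' || c == '-' then r else c :: r

-- mantissa: digits | digits '.' [digits] | '.' digits  (underscore rule inside)
def pvMantOk (m : List Char) : Bool :=
  if m.contains '.' then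
    let a := m.takeWhile (fun c => !(c == '.'))
    let b := (m.dropWhile (fun c => !(c == '.'))).tail
    (!b.contains '.') && (a.isEmpty || pvDigitsU a) && (b.isEmpty || pvDigitsU b)
      && !(a.isEmpty && b.isEmpty)
  else pvDigitsU m

-- float(s) success test: ws, sign, then inf/infinity/nan or mantissa[exponent]
def pvFloatOk (s : List Char) : Bool :=
  let t := pvSign (PySem.Chars.strip s)
  let low := PySem.Chars.lower t
  if low == "inf".toList || low == "infinity".toList || low == "nan".toList then true
  else
    let mant := low.takeWhile (fun c => !(c == 'e'))
    match low.dropWhile (fun c => !(c == 'e')) with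
    | [] => pvMantOk mant
    | _ :: ex => pvMantOk mant && pvDigitsU (pvSign ex)

-- isevalnum(s): int(s) succeeds, or float(s) succeeds
def pvIsEvalNum (s : List Char) : Bool := (PySem.Int.ofChars? s).isSome || pvFloatOk s

-- title = edat.split("#Title")[1].split('\n')[0] if '#Title' in edat else label
def pvTitle (e l : List Char) : List Char :=
  if PySem.Chars.isIn ("#Title".toList) e then
    PySem.List.pyGetD
      (PySem.Chars.splitOn (PySem.List.pyGetD (PySem.Chars.splitOn e ("#Title".toList)) 1 []) ['\n']) 0 []
  else l

-- xylabels = edat.split("#Labels")[1].split('\n')[0] if '#Labels' in edat else ''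
def pvXYLabels (e : List Char) : List Char :=
  if PySem.Chars.isIn ("#Labels".toList) e then
    PySem.List.pyGetD
      (PySem.Chars.splitOn (PySem.List.pyGetD (PySem.Chars.splitOn e ("#Labels".toList)) 1 []) ['\n']) 0 []
  else []

-- elist = edat.strip().split("\n"); while '#' in elist[0]: elist = elist[1:]
def pvRest (e : List Char) : List (List Char) :=
  (PySem.Chars.splitOn (PySem.Chars.strip e) ['\n']).dropWhile
    (fun ln => PySem.Chars.isIn ['#'] ln)

-- template literals (msg4 pieces, split at the %s holes)
def pvHtml0 : List Char := ("<html>\n" : String).toList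
def pvT1a : List Char := ("\n    <link href=\"https://cdnjs.cloudflare.com/ajax/libs/c3/0.6.9/c3.min.css\" rel=\"stylesheet\">\n    <script type=\"text/javascript\" src=\"https://d3js.org/d3.v5.min.js\" charset=\"utf-8\"></script>\n    <script type=\"text/javascript\" src=\"https://cdnjs.cloudflare.com/ajax/libs/c3/0.6.9/c3.min.js\"></script>\n    <br> <center><b> " : String).toList
def pvT1b : List Char := (" </b></center>\n    <div id=\"chart\"></div>\n    <script type=\"text/javascript\">\n    var chart = c3.generate({\n       bindto: '#chart',\n       size: { height: 480},\n       data: {\n         type: 'spline',\n         x: '" : String).toList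
def pvT1c : List Char := ("',\n         columns: [\n           " : String).toList
def pvT1d : List Char := ("  " : String).toList
def pvT2a : List Char := ("\n         ]\n       },\n       axis: {\n           x: {\n               label: '" : String).toList
def pvT2b : List Char := ("',\n               tick: {count: 10, format: d3.format(\".2f\"), culling: false}\n           },\n           y: {\n               label: 'y data'\n           }\n       }\n    });\n    </script>\n    " : String).toList
def pvHtml1 : List Char := ("</html>\n" : String).toList

-- hand port of str.rstrip(',') (PySem.Chars.stripChars strips both sides)
def pvRstripComma (s : List Char) : List Char :=
  (s.reverse.dropWhile (fun c => c == ',')).reverse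

-- A, statement for statement, on char lists (the branch yields the tuple
-- (xlabel, xdat, ydat, elist) of the variables Python leaves behind; ee.split()
-- is recomputed at each use — same value as Python's ss)
def pvACore (e l : List Char) : List Char :=
  let title := pvTitle e l
  let xylabels := pvXYLabels e
  let elist := pvRest e
  let ss0 := PySem.Chars.split₀ (PySem.List.pyGetD elist 0 [])
  let ny : Int := PySem.List.len ss0 - 1
  let hasheader := !(pvIsEvalNum (PySem.List.pyGetD ss0 0 []))
  let st0 : List Char × List Char × List (List Char) × List (List Char) :=
    if hasheader then
      ( PySem.List.pyGetD ss0 0 [],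
        "['".toList ++ PySem.List.pyGetD ss0 0 [] ++ "',".toList,
        (PySem.List.pyRange 0 ny 1).foldl
          (fun yd i => yd ++ [("['".toList ++ PySem.List.pyGetD ss0 (i+1) [] ++ "',".toList)]) [],
        PySem.List.slice elist (some 1) none )
    else
      let ydat := (PySem.List.pyRange 0 ny 1).foldl
          (fun yd i => yd ++ [("['y".toList ++ PySem.Int.toChars i ++ "',".toList)]) []
      if xylabels ≠ [] then
        ( PySem.List.pyGetD (PySem.Chars.split₀ xylabels) 0 [],
          "['".toList ++ PySem.List.pyGetD (PySem.Chars.split₀ xylabels) 0 [] ++ "',".toList,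
          (PySem.List.pyRange 1 (PySem.List.len (PySem.Chars.split₀ xylabels)) 1).foldl
            (fun yd i => PySem.List.pySetD yd (i-1)
              ("['".toList ++ PySem.List.pyGetD (PySem.Chars.split₀ xylabels) i [] ++ "',".toList)) ydat,
          elist )
      else ("x".toList, "['x',".toList, ydat, elist)
  let st : List Char × List (List Char) := st0.2.2.2.foldl
    (fun st ee =>
      if !(PySem.Chars.isIn ['#'] (PySem.List.pyGetD (PySem.Chars.split₀ ee) 0 [])) then
        ( st.1 ++ (PySem.List.pyGetD (PySem.Chars.split₀ ee) 0 [] ++ ", ".toList),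
          (PySem.List.pyRange 0 ny 1).foldl
            (fun yd i => PySem.List.pySetD yd i
              (PySem.List.pyGetD yd i [] ++ (PySem.List.pyGetD (PySem.Chars.split₀ ee) (i+1) [] ++ ", ".toList))) st.2 )
      else st)
    (st0.2.1, st0.2.2.1)
  let xdatF := pvRstripComma st.1 ++ "]".toList
  let ydatF := (PySem.List.pyRange 0 ny 1).foldl
    (fun yd i => PySem.List.pySetD yd i
      (pvRstripComma (PySem.List.pyGetD yd i []) ++ "]".toList)) st.2
  pvHtml0 ++ (pvT1a ++ title ++ pvT1b ++ st0.1 ++ pvT1c ++ xdatF ++ pvT1d)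
    ++ (PySem.List.pyRange 0 ny 1).foldl
        (fun m i => m ++ (", ".toList ++ PySem.List.pyGetD ydatF i [])) []
    ++ (pvT2a ++ st0.1 ++ pvT2b)
    ++ pvHtml1

def xydata_plotdatajs (edat : String) (label : String) : String :=
  String.ofList (pvACore edat.toList label.toList)

-- ===== PORT B =====
-- one chart column: "['name'," + ", ".join(vals) + ", ]"   (or "['name']")
def pvMkCol (name : List Char) (vals : List (List Char)) : List Char :=
  if vals.isEmpty then "['".toList ++ name ++ "']".toList
  else "['".toList ++ name ++ "',".toList ++ PySem.Chars.join (", ".toList) vals ++ ", ]".toList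

-- B: names and body, then the row table, then columns by index
def pvBCore (e l : List Char) : List Char :=
  let title := pvTitle e l
  let xylabels := pvXYLabels e
  let lines := pvRest e
  let first := PySem.Chars.split₀ (PySem.List.pyGetD lines 0 [])
  let ny : Int := PySem.List.len first - 1
  let nb : List (List Char) × List (List Char) :=
    if !(pvIsEvalNum (PySem.List.pyGetD first 0 [])) then
      (first, PySem.List.slice lines (some 1) none)
    else
      let base := "x".toList ::
        (PySem.List.pyRange 0 ny 1).map (fun i => "y".toList ++ PySem.Int.toChars i)
      if xylabels ≠ [] then
        (PySem.Chars.split₀ xylabels ++ base.drop (PySem.Chars.split₀ xylabels).length, lines)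
      else (base, lines)
  let names := nb.1
  let data := (nb.2.map PySem.Chars.split₀).filter
    (fun r => !(PySem.Chars.isIn ['#'] (PySem.List.pyGetD r 0 [])))
  let cols := (PySem.List.pyRange 0 (ny+1) 1).map
    (fun i => pvMkCol (PySem.List.pyGetD names i []) (data.map (fun r => PySem.List.pyGetD r i [])))
  pvHtml0 ++ (pvT1a ++ title ++ pvT1b ++ PySem.List.pyGetD names 0 [] ++ pvT1c
      ++ PySem.List.pyGetD cols 0 [] ++ pvT1d)
    ++ (cols.drop 1).flatMap (fun c => ", ".toList ++ c)
    ++ (pvT2a ++ PySem.List.pyGetD names 0 [] ++ pvT2b)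
    ++ pvHtml1

def xydata_plotdatajs_alt (edat : String) (label : String) : String :=
  String.ofList (pvBCore edat.toList label.toList)

-- ===== PRECONDITION & SPEC =====
-- Pre_ excludes exactly the inputs on which A raises (IndexError): no line free
-- of '#', a whitespace-only first kept line or body line, a data row shorter
-- than the first kept line, or an empty/too-long '#Labels' word list.
def Pre_xydata_plotdatajs (edat : String) (label : String) : Prop :=
  pvRest edat.toList ≠ [] ∧
  PySem.Chars.split₀ (PySem.List.pyGetD (pvRest edat.toList) 0 []) ≠ [] ∧
  (∀ ln ∈ (if (!(pvIsEvalNum (PySem.List.pyGetD (PySem.Chars.split₀ (PySem.List.pyGetD (pvRest edat.toList) 0 [])) 0 []))) = true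
      then (pvRest edat.toList).drop 1 else pvRest edat.toList),
    PySem.Chars.split₀ ln ≠ [] ∧
    (PySem.Chars.isIn ['#'] (PySem.List.pyGetD (PySem.Chars.split₀ ln) 0 []) = false →
      (PySem.Chars.split₀ (PySem.List.pyGetD (pvRest edat.toList) 0 [])).length
        ≤ (PySem.Chars.split₀ ln).length)) ∧
  ((!(pvIsEvalNum (PySem.List.pyGetD (PySem.Chars.split₀ (PySem.List.pyGetD (pvRest edat.toList) 0 [])) 0 []))) = false →
    pvXYLabels edat.toList ≠ [] →
    PySem.Chars.split₀ (pvXYLabels edat.toList) ≠ [] ∧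
    (PySem.Chars.split₀ (pvXYLabels edat.toList)).length
      ≤ (PySem.Chars.split₀ (PySem.List.pyGetD (pvRest edat.toList) 0 [])).length)

instance (edat : String) (label : String) : Decidable (Pre_xydata_plotdatajs edat label) := by
  unfold Pre_xydata_plotdatajs; infer_instance

def pvWitness_xydata_plotdatajs : String × String := ("t v\n1 2\n3 4", "lbl")

def Spec_xydata_plotdatajs (edat : String) (label : String) (out : String) : Prop := out = xydata_plotdatajs_alt edat label
instance (edat : String) (label : String) (out : String) : Decidable (Spec_xydata_plotdatajs edat label out) := by unfold Spec_xydata_plotdatajs; infer_instance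

-- ===== CLAIM (what is proved, stated in full; the proofs are below) =====
def Claim_equal_xydata_plotdatajs : Prop := ∀ (edat : String) (label : String), Dom_xydata_plotdatajs edat label → Pre_xydata_plotdatajs edat label → Spec_xydata_plotdatajs edat label (xydata_plotdatajs edat label)

-- ===== LEMMAS AND PROOFS =====

-- the rows A's data loop accepts = B's `data` table
def pvFilt (body : List (List Char)) : List (List (List Char)) :=
  (body.map PySem.Chars.split₀).filter
    (fun r => !(PySem.Chars.isIn ['#'] (PySem.List.pyGetD r 0 [])))

lemma pv_pyRange_cast (n : Nat) :
    PySem.List.pyRange 0 (n : Int) 1 = (List.range n).map (fun k : Nat => (k : Int)) := by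
  rw [PySem.List.pyRange_one]
  have h1 : (((n : Int) - 0)).toNat = n := by omega
  rw [h1]
  apply List.map_congr_left
  intro k _
  omega

lemma pv_mapIdx_id {A : Type} (l : List A) : l.mapIdx (fun _ a => a) = l := by
  apply List.ext_getElem
  · simp
  · intro i h1 h2; simp [List.getElem_mapIdx]

lemma pv_mapIdx_range_map {A B : Type} (f : Nat → A) (g : Nat → A → B) (n : Nat) :
    ((List.range n).map f).mapIdx g = (List.range n).map (fun k => g k (f k)) := by
  apply List.ext_getElem
  · simp
  · intro i h1 h2; simp [List.getElem_mapIdx]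

lemma pv_flatMap_map {A B C : Type} (l : List A) (p : A → B) (h : B → List C) :
    (l.map p).flatMap h = l.flatMap (fun x => h (p x)) := by
  induction l with
  | nil => rfl
  | cons a t ih => simp only [List.map_cons, List.flatMap_cons, ih]

lemma pv_flatMap_congr {A B : Type} (l : List A) (f g : A → List B)
    (h : ∀ x ∈ l, f x = g x) : l.flatMap f = l.flatMap g := by
  induction l with
  | nil => rfl
  | cons a t ih =>
    simp only [List.flatMap_cons]
    rw [h a (by simp), ih (fun x hx => h x (by simp [hx]))]

-- a loop 'for k in range(m): acc[k] = g(k, acc[k])' is a mapIdx on the m-prefix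
lemma pv_fold_set (g : Int → List Char → List Char) :
    ∀ (m : Nat) (yd : List (List Char)), m ≤ yd.length →
    (List.range m).foldl
      (fun acc (k : Nat) => PySem.List.pySetD acc (k : Int) (g (k : Int) (PySem.List.pyGetD acc (k : Int) []))) yd
      = (yd.take m).mapIdx (fun k a => g (k : Int) a) ++ yd.drop m := by
  intro m
  induction m with
  | zero => intro yd h; simp
  | succ m ih =>
    intro yd h
    have hm : m < yd.length := h
    rw [List.range_succ, List.foldl_append, List.foldl_cons, List.foldl_nil, ih yd (by omega)]
    rw [PySem.List.pyGetD_natCast, PySem.List.pySetD_natCast]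
    have hlen : ((yd.take m).mapIdx (fun k a => g (k : Int) a)).length = m := by
      simp [List.length_mapIdx, List.length_take]; omega
    have hget : ((yd.take m).mapIdx (fun k a => g (k : Int) a) ++ yd.drop m).getD m [] = yd[m] := by
      rw [List.getD_eq_getElem?_getD, List.getElem?_append_right (by omega), hlen,
        List.getElem?_drop]
      simp [hm]
    rw [hget, List.set_append_right _ _ (by omega), hlen, Nat.sub_self,
      List.drop_eq_getElem_cons hm, List.set_cons_zero]
    rw [List.take_add_one, List.getElem?_eq_getElem hm]
    simp only [Option.toList_some, List.mapIdx_concat]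
    have hlt : (yd.take m).length = m := by simp [List.length_take]; omega
    rw [hlt]
    simp [List.append_assoc]

-- pure-assignment version with Python's 1-based shifted index, 'acc[i-1] = f(i)'
lemma pv_fold_set_shift (f : Int → List Char) :
    ∀ (m : Nat) (yd : List (List Char)), m ≤ yd.length →
    (List.range m).foldl
      (fun acc (k : Nat) => PySem.List.pySetD acc ((1 : Int)+(k : Int)-1) (f ((1 : Int)+(k : Int)))) yd
      = (List.range m).map (fun k : Nat => f ((1 : Int)+(k : Int))) ++ yd.drop m := by
  intro m
  induction m with
  | zero => intro yd h; simp
  | succ m ih =>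
    intro yd h
    have hm : m < yd.length := h
    rw [List.range_succ, List.foldl_append, List.foldl_cons, List.foldl_nil, ih yd (by omega)]
    have e : (1 : Int)+(m : Int)-1 = ((m : Nat) : Int) := by omega
    rw [e, PySem.List.pySetD_natCast]
    rw [List.set_append_right _ _ (by simp), List.length_map, List.length_range, Nat.sub_self,
      List.drop_eq_getElem_cons hm, List.set_cons_zero]
    rw [List.map_append, List.map_singleton]
    simp [List.append_assoc]

-- the pyRange/pySetD read-modify loop over a full list of length n is a mapIdx
lemma pv_pyfold_set (g : Int → List Char → List Char) (n : Nat) (yd : List (List Char))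
    (h : yd.length = n) :
    (PySem.List.pyRange 0 (n : Int) 1).foldl
      (fun acc i => PySem.List.pySetD acc i (g i (PySem.List.pyGetD acc i []))) yd
    = yd.mapIdx (fun k a => g (k : Int) a) := by
  rw [pv_pyRange_cast, List.foldl_map, pv_fold_set g n yd (by omega)]
  rw [← h, List.take_length, List.drop_length, List.append_nil]

-- A's data loop, in closed form: first component collects column 0, the k-th
-- ydat entry collects column k+1, both over the accepted rows
lemma pv_loop (n : Nat) (body : List (List Char)) :
    ∀ (x : List Char) (yd : List (List Char)), yd.length = n →
    body.foldl
      (fun st ee =>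
        if !(PySem.Chars.isIn ['#'] (PySem.List.pyGetD (PySem.Chars.split₀ ee) 0 [])) then
          ( st.1 ++ (PySem.List.pyGetD (PySem.Chars.split₀ ee) 0 [] ++ ", ".toList),
            (PySem.List.pyRange 0 (n : Int) 1).foldl
              (fun yd i => PySem.List.pySetD yd i
                (PySem.List.pyGetD yd i [] ++ (PySem.List.pyGetD (PySem.Chars.split₀ ee) (i+1) [] ++ ", ".toList))) st.2 )
        else st) (x, yd)
    = (x ++ (pvFilt body).flatMap (fun r => PySem.List.pyGetD r 0 [] ++ ", ".toList),
       yd.mapIdx (fun k old => old ++ (pvFilt body).flatMap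
         (fun r => PySem.List.pyGetD r ((k : Int)+1) [] ++ ", ".toList))) := by
  induction body with
  | nil =>
    intro x yd h
    simp only [List.foldl_nil, pvFilt, List.map_nil, List.filter_nil, List.flatMap_nil,
      List.append_nil, pv_mapIdx_id]
  | cons ee rest ih =>
    intro x yd h
    rw [List.foldl_cons]
    by_cases hc : PySem.Chars.isIn ['#'] (PySem.List.pyGetD (PySem.Chars.split₀ ee) 0 []) = true
    · have hf : pvFilt (ee :: rest) = pvFilt rest := by
        simp [pvFilt, hc]
      rw [if_neg (by simp [hc]), ih x yd h, hf]
    · rw [if_pos (by simp [hc])]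
      have hf : pvFilt (ee :: rest) = PySem.Chars.split₀ ee :: pvFilt rest := by
        simp [pvFilt, hc]
      dsimp only
      rw [pv_pyfold_set
        (fun i old => old ++ (PySem.List.pyGetD (PySem.Chars.split₀ ee) (i+1) [] ++ ", ".toList))
        n yd h]
      rw [ih _ _ (by simp [List.length_mapIdx, h])]
      rw [hf, List.mapIdx_mapIdx]
      refine Prod.ext ?_ ?_
      · simp [List.flatMap_cons, List.append_assoc]
      · dsimp only
        congr 1
        funext k a
        simp [List.flatMap_cons, List.append_assoc]

lemma pv_rstrip_comma (s : List Char) : pvRstripComma (s ++ [',']) = pvRstripComma s := by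
  simp [pvRstripComma]

lemma pv_rstrip_stop (s : List Char) (c : Char) (h : (c == ',') = false) :
    pvRstripComma (s ++ [c]) = s ++ [c] := by
  simp [pvRstripComma, h]

lemma pv_flatMap_join : ∀ (v : List Char) (vs : List (List Char)),
    (v :: vs).flatMap (fun w => w ++ ", ".toList)
      = PySem.Chars.join (", ".toList) (v :: vs) ++ [',', ' ']
  | v, [] => by
    simp [PySem.Chars.join_singleton]
  | v, w :: t => by
    rw [List.flatMap_cons, pv_flatMap_join w t, PySem.Chars.join_cons_cons]
    have hc : (", ".toList : List Char) = [',', ' '] := rfl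
    simp [hc]

-- the rstrip(',') + "]" finish of an accumulated column equals B's joined column
lemma pv_colstr (name : List Char) (vals : List (List Char)) :
    pvRstripComma (("['".toList ++ name ++ "',".toList)
        ++ vals.flatMap (fun w => w ++ ", ".toList)) ++ "]".toList
      = pvMkCol name vals := by
  have hq : ("',".toList : List Char) = ['\''] ++ [','] := rfl
  cases vals with
  | nil =>
    rw [List.flatMap_nil, List.append_nil, hq]
    rw [show ("['".toList ++ name ++ (['\''] ++ [','])) = (("['".toList ++ name ++ ['\'']) ++ [','])
        by simp [List.append_assoc]]
    rw [pv_rstrip_comma, pv_rstrip_stop _ '\'' (by decide)]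
    simp [pvMkCol, List.append_assoc]
  | cons v vs =>
    rw [pv_flatMap_join]
    rw [show ("['".toList ++ name ++ "',".toList
          ++ (PySem.Chars.join (", ".toList) (v :: vs) ++ [',', ' ']))
        = (("['".toList ++ name ++ "',".toList
            ++ PySem.Chars.join (", ".toList) (v :: vs) ++ [',']) ++ [' '])
        by simp [List.append_assoc]]
    rw [pv_rstrip_stop _ ' ' (by decide)]
    have : (pvMkCol name (v :: vs))
        = "['".toList ++ name ++ "',".toList
            ++ PySem.Chars.join (", ".toList) (v :: vs) ++ ", ]".toList := by
      simp [pvMkCol]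
    rw [this]
    have hz : (", ]".toList : List Char) = [','] ++ [' '] ++ [']'] := rfl
    have hb : ("]".toList : List Char) = [']'] := rfl
    rw [hz, hb]
    simp [List.append_assoc]

-- row-table form of the same fact
lemma pv_colstr_rows {A : Type} (name : List Char) (rows : List A) (q : A → List Char) :
    pvRstripComma (("['".toList ++ name ++ "',".toList)
        ++ rows.flatMap (fun r => q r ++ ", ".toList)) ++ "]".toList
      = pvMkCol name (rows.map q) := by
  rw [← pv_colstr name (rows.map q), pv_flatMap_map]

lemma pv_ylit (t : List Char) :
    "['y".toList ++ t ++ "',".toList = "['".toList ++ ("y".toList ++ t) ++ "',".toList := by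
  have h : ("['y".toList : List Char) = "['".toList ++ "y".toList := rfl
  rw [h]
  simp [List.append_assoc]

-- header branch: the appended ydat names in closed form
lemma pv_ydatHdr (n : Nat) (ss0 : List (List Char)) :
    (PySem.List.pyRange 0 (n : Int) 1).foldl
      (fun yd i => yd ++ [("['".toList ++ PySem.List.pyGetD ss0 (i+1) [] ++ "',".toList)]) []
    = (List.range n).map
        (fun k : Nat => "['".toList ++ PySem.List.pyGetD ss0 ((k : Int)+1) [] ++ "',".toList) := by
  rw [PySem.List.foldl_append_singleton_eq_map, List.nil_append, pv_pyRange_cast, List.map_map]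
  rfl

-- default-names branch: the "['y%d'," list in closed form
lemma pv_ydatBase' (n : Nat) :
    (PySem.List.pyRange 0 (n : Int) 1).foldl
      (fun yd i => yd ++ [("['y".toList ++ PySem.Int.toChars i ++ "',".toList)]) []
    = (List.range n).map
        (fun k : Nat => "['y".toList ++ PySem.Int.toChars (k : Int) ++ "',".toList) := by
  rw [PySem.List.foldl_append_singleton_eq_map, List.nil_append, pv_pyRange_cast, List.map_map]
  rfl

lemma pv_base_get (n k : Nat) (hk : k < n) :
    PySem.List.pyGetD
      ("x".toList :: (PySem.List.pyRange 0 (n : Int) 1).map (fun i => "y".toList ++ PySem.Int.toChars i))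
      ((k : Int)+1) []
    = "y".toList ++ PySem.Int.toChars (k : Int) := by
  have h1 : ((k : Int)+1) = ((k+1 : Nat) : Int) := by push_cast; ring
  rw [h1, PySem.List.pyGetD_natCast, pv_pyRange_cast, List.map_map, List.getD_cons_succ]
  rw [PySem.List.getD_map_range _ n k _ hk]
  rfl

lemma pv_ydatBaseN (n : Nat) :
    (PySem.List.pyRange 0 (n : Int) 1).foldl
      (fun yd i => yd ++ [("['y".toList ++ PySem.Int.toChars i ++ "',".toList)]) []
    = (List.range n).map
        (fun k : Nat => "['".toList ++ PySem.List.pyGetD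
          ("x".toList :: (PySem.List.pyRange 0 (n : Int) 1).map (fun i => "y".toList ++ PySem.Int.toChars i))
          ((k : Int)+1) [] ++ "',".toList) := by
  rw [pv_ydatBase']
  apply List.map_congr_left
  intro k hk
  rw [pv_base_get n k (List.mem_range.mp hk), pv_ylit]

lemma pv_get0_append (xl rest' : List (List Char)) (h : xl ≠ []) :
    PySem.List.pyGetD xl 0 [] = PySem.List.pyGetD (xl ++ rest') 0 [] := by
  cases xl with
  | nil => cases h rfl
  | cons a t => simp [PySem.List.pyGetD_zero_cons]

-- '#Labels' branch: the overwritten ydat names in closed form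
lemma pv_ydatLabels (n : Nat) (xl : List (List Char)) (hxl : xl ≠ []) (hL : xl.length ≤ n + 1) :
    (PySem.List.pyRange 1 (PySem.List.len xl) 1).foldl
      (fun yd i => PySem.List.pySetD yd (i-1)
        ("['".toList ++ PySem.List.pyGetD xl i [] ++ "',".toList))
      ((PySem.List.pyRange 0 (n : Int) 1).foldl
        (fun yd i => yd ++ [("['y".toList ++ PySem.Int.toChars i ++ "',".toList)]) [])
    = (List.range n).map
        (fun k : Nat => "['".toList ++ PySem.List.pyGetD
          (xl ++ ("x".toList :: (PySem.List.pyRange 0 (n : Int) 1).map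
            (fun i => "y".toList ++ PySem.Int.toChars i)).drop xl.length)
          ((k : Int)+1) [] ++ "',".toList) := by
  have hL1 : 1 ≤ xl.length := by
    cases xl with
    | nil => cases hxl rfl
    | cons a t => simp
  rw [pv_ydatBase']
  have hr : PySem.List.pyRange 1 (PySem.List.len xl) 1
      = (List.range (xl.length - 1)).map (fun k : Nat => (1 : Int) + (k : Int)) := by
    have h2 : (((xl.length : Int)) - 1).toNat = xl.length - 1 := by omega
    rw [PySem.List.len_eq, PySem.List.pyRange_one, h2]
  rw [hr, List.foldl_map]
  rw [pv_fold_set_shift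
    (fun i => "['".toList ++ PySem.List.pyGetD xl i [] ++ "',".toList)
    (xl.length - 1) _ (by simp; omega)]
  apply List.ext_getElem
  · simp; omega
  · intro i hi1 hi2
    have hin : i < n := by simpa using hi2
    by_cases hiL : i < xl.length - 1
    · rw [List.getElem_append_left (by simp; omega)]
      simp only [List.getElem_map, List.getElem_range]
      have e1 : ((1 : Int)+(i : Int)) = ((i+1 : Nat) : Int) := by push_cast; ring
      have e2 : ((i : Int)+1) = ((i+1 : Nat) : Int) := by push_cast; ring
      rw [e1, e2, PySem.List.pyGetD_natCast, PySem.List.pyGetD_natCast]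
      rw [List.getD_eq_getElem?_getD, List.getD_eq_getElem?_getD,
        List.getElem?_append_left (by omega)]
    · rw [List.getElem_append_right (by simp; omega)]
      simp only [List.length_map, List.length_range, List.getElem_drop]
      have hidx : xl.length - 1 + (i - (xl.length - 1)) = i := by omega
      simp only [hidx]
      simp only [List.getElem_map, List.getElem_range]
      have e2 : ((i : Int)+1) = ((i+1 : Nat) : Int) := by push_cast; ring
      rw [e2, PySem.List.pyGetD_natCast]
      rw [List.getD_eq_getElem?_getD, List.getElem?_append_right (by omega)]
      rw [List.getElem?_drop]
      have hidx2 : xl.length + (i + 1 - xl.length) = i + 1 := by omega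
      rw [hidx2, List.getElem?_cons_succ]
      rw [pv_pyRange_cast, List.map_map, List.getElem?_map, List.getElem?_range (by omega)]
      simp only [Option.map_some, Option.getD_some, Function.comp]
      rw [pv_ylit]

-- finishing pass: rstrip(',')+"]" over a column list given as a range-map
lemma pv_rstrip_fold_map (F : Nat → List Char) (n : Nat) :
    (PySem.List.pyRange 0 (n : Int) 1).foldl
      (fun acc i => PySem.List.pySetD acc i
        (pvRstripComma (PySem.List.pyGetD acc i []) ++ "]".toList))
      ((List.range n).map F)
    = (List.range n).map (fun k : Nat => pvRstripComma (F k) ++ "]".toList) := by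
  rw [pv_pyfold_set (fun _ old => pvRstripComma old ++ "]".toList) n ((List.range n).map F) (by simp),
    pv_mapIdx_range_map]

lemma pv_msg_collapse (colA : Nat → List Char) (n : Nat) :
    (List.range n).flatMap (fun k => ", ".toList ++ ((List.range n).map colA).getD k [])
      = (List.range n).flatMap (fun k => ", ".toList ++ colA k) :=
  pv_flatMap_congr _ _ _
    (fun k hk => by rw [PySem.List.getD_map_range _ n k _ (List.mem_range.mp hk)])

-- the whole tail of both programs, given matching names/body and start state
lemma pv_assemble (title : List Char) (names : List (List Char)) (n : Nat)
    (body : List (List Char)) (xlab x0 : List Char) (yd0 : List (List Char))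
    (hx : xlab = PySem.List.pyGetD names 0 [])
    (hx0 : x0 = "['".toList ++ xlab ++ "',".toList)
    (hyd0 : yd0 = (List.range n).map
      (fun k : Nat => "['".toList ++ PySem.List.pyGetD names ((k : Int)+1) [] ++ "',".toList)) :
    (pvHtml0 ++ (pvT1a ++ title ++ pvT1b ++ xlab ++ pvT1c
        ++ (pvRstripComma
            (body.foldl
              (fun st ee =>
                if !(PySem.Chars.isIn ['#'] (PySem.List.pyGetD (PySem.Chars.split₀ ee) 0 [])) then
                  ( st.1 ++ (PySem.List.pyGetD (PySem.Chars.split₀ ee) 0 [] ++ ", ".toList),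
                    (PySem.List.pyRange 0 (n : Int) 1).foldl
                      (fun yd i => PySem.List.pySetD yd i
                        (PySem.List.pyGetD yd i [] ++ (PySem.List.pyGetD (PySem.Chars.split₀ ee) (i+1) [] ++ ", ".toList))) st.2 )
                else st) (x0, yd0)).1 ++ "]".toList) ++ pvT1d)
      ++ (PySem.List.pyRange 0 (n : Int) 1).foldl
          (fun m i => m ++ (", ".toList ++ PySem.List.pyGetD
            ((PySem.List.pyRange 0 (n : Int) 1).foldl
              (fun yd i => PySem.List.pySetD yd i
                (pvRstripComma (PySem.List.pyGetD yd i []) ++ "]".toList))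
              (body.foldl
                (fun st ee =>
                  if !(PySem.Chars.isIn ['#'] (PySem.List.pyGetD (PySem.Chars.split₀ ee) 0 [])) then
                    ( st.1 ++ (PySem.List.pyGetD (PySem.Chars.split₀ ee) 0 [] ++ ", ".toList),
                      (PySem.List.pyRange 0 (n : Int) 1).foldl
                        (fun yd i => PySem.List.pySetD yd i
                          (PySem.List.pyGetD yd i [] ++ (PySem.List.pyGetD (PySem.Chars.split₀ ee) (i+1) [] ++ ", ".toList))) st.2 )
                  else st) (x0, yd0)).2) i [])) []
      ++ (pvT2a ++ xlab ++ pvT2b)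
      ++ pvHtml1)
    = (pvHtml0 ++ (pvT1a ++ title ++ pvT1b ++ PySem.List.pyGetD names 0 [] ++ pvT1c
        ++ PySem.List.pyGetD
            ((PySem.List.pyRange 0 ((n : Int)+1) 1).map
              (fun i => pvMkCol (PySem.List.pyGetD names i [])
                (((body.map PySem.Chars.split₀).filter
                  (fun r => !(PySem.Chars.isIn ['#'] (PySem.List.pyGetD r 0 [])))).map
                  (fun r => PySem.List.pyGetD r i [])))) 0 [] ++ pvT1d)
      ++ (((PySem.List.pyRange 0 ((n : Int)+1) 1).map
              (fun i => pvMkCol (PySem.List.pyGetD names i [])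
                (((body.map PySem.Chars.split₀).filter
                  (fun r => !(PySem.Chars.isIn ['#'] (PySem.List.pyGetD r 0 [])))).map
                  (fun r => PySem.List.pyGetD r i [])))).drop 1).flatMap
            (fun c => ", ".toList ++ c)
      ++ (pvT2a ++ PySem.List.pyGetD names 0 [] ++ pvT2b)
      ++ pvHtml1) := by
  subst hx0 hx hyd0
  rw [pv_loop n body _ _ (by simp)]
  dsimp only
  simp only [pv_mapIdx_range_map]
  rw [pv_rstrip_fold_map]
  simp only [pv_colstr_rows]
  rw [PySem.List.foldl_append_eq_flatMap, List.nil_append]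
  rw [pv_pyRange_cast, pv_flatMap_map]
  simp only [PySem.List.pyGetD_natCast]
  rw [pv_msg_collapse]
  -- B side: cols as a cons over range n
  have hcolsB : PySem.List.pyRange 0 ((n : Int)+1) 1
      = (List.range (n+1)).map (fun k : Nat => (k : Int)) := by
    have h : ((n : Int)+1) = ((n+1 : Nat) : Int) := by push_cast; ring
    rw [h, pv_pyRange_cast]
  rw [hcolsB, List.map_map, List.range_succ_eq_map, List.map_cons, List.map_map]
  simp only [List.drop_succ_cons, List.drop_zero, PySem.List.pyGetD_zero_cons]
  rw [pv_flatMap_map]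
  simp only [Function.comp, Nat.succ_eq_add_one, Nat.cast_succ, Nat.cast_zero, pvFilt]

-- the two programs agree whenever A completes
lemma pv_core_eq (e l : List Char)
    (hfirst : PySem.Chars.split₀ (PySem.List.pyGetD (pvRest e) 0 []) ≠ [])
    (hxy : pvIsEvalNum (PySem.List.pyGetD (PySem.Chars.split₀ (PySem.List.pyGetD (pvRest e) 0 [])) 0 []) = true →
      pvXYLabels e ≠ [] →
      PySem.Chars.split₀ (pvXYLabels e) ≠ [] ∧
      (PySem.Chars.split₀ (pvXYLabels e)).length
        ≤ (PySem.Chars.split₀ (PySem.List.pyGetD (pvRest e) 0 [])).length) :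
    pvACore e l = pvBCore e l := by
  simp only [pvACore, pvBCore]
  set ss0 := PySem.Chars.split₀ (PySem.List.pyGetD (pvRest e) 0 []) with hss
  have hpos : 0 < ss0.length := List.length_pos_of_ne_nil hfirst
  set n : Nat := ss0.length - 1 with hn
  have hny : PySem.List.len ss0 - 1 = (n : Int) := by
    rw [PySem.List.len_eq]
    omega
  rw [hny]
  split_ifs with hh hlab
  · -- header line: names come from the first row
    exact pv_assemble (pvTitle e l) ss0 n (PySem.List.slice (pvRest e) (some 1) none)
      (PySem.List.pyGetD ss0 0 []) _ _ rfl rfl (pv_ydatHdr n ss0)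
  · -- no header, '#Labels' words override the default names
    have hX : pvIsEvalNum (PySem.List.pyGetD ss0 0 []) = true := by
      simpa using hh
    obtain ⟨hxl, hL⟩ := hxy hX hlab
    exact pv_assemble (pvTitle e l)
      (PySem.Chars.split₀ (pvXYLabels e) ++
        ("x".toList :: (PySem.List.pyRange 0 (n : Int) 1).map
          (fun i => "y".toList ++ PySem.Int.toChars i)).drop (PySem.Chars.split₀ (pvXYLabels e)).length)
      n (pvRest e)
      (PySem.List.pyGetD (PySem.Chars.split₀ (pvXYLabels e)) 0 []) _ _
      (pv_get0_append _ _ hxl)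
      rfl
      (pv_ydatLabels n (PySem.Chars.split₀ (pvXYLabels e)) hxl (by omega))
  · -- no header, default x/y%d names
    exact pv_assemble (pvTitle e l)
      ("x".toList :: (PySem.List.pyRange 0 (n : Int) 1).map
        (fun i => "y".toList ++ PySem.Int.toChars i))
      n (pvRest e)
      ("x".toList) _ _ (by rw [PySem.List.pyGetD_zero_cons]) rfl (pv_ydatBaseN n)

-- ===== VERDICT (by name: the statement is the Claim_ definition above) =====
theorem xydata_plotdatajs_spec : Claim_equal_xydata_plotdatajs := by
  intro edat label _hdom hpre
  obtain ⟨h1, h2, h3, h4⟩ := hpre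
  unfold Spec_xydata_plotdatajs xydata_plotdatajs xydata_plotdatajs_alt
  refine congrArg String.ofList ?_
  refine pv_core_eq edat.toList label.toList h2 ?_
  intro hX hlab
  exact h4 (by simp [hX]) hlab
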